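-- pv_equiv track=rewrite | github.com/Shqet/Surprize_v4.0 | app/ui/widgets/config_json_editor.py | _normalize_expanded
-- ===== SOURCE A (Python) =====
-- from typing import Any, Optional, Set
--
-- def _normalize_expanded(paths: Set[str]) -> Set[str]:
--     out: Set[str] = set()
--     for p in paths:
--         if not p:
--             continue
--         chunks = p.split(".")
--         for i in range(1, len(chunks) + 1):
--             out.add(".".join(chunks[:i]))
--     return out
-- ===== SOURCE B (Python) =====
-- from typing import Set
--
-- def _normalize_expanded(paths: Set[str]) -> Set[str]:
--     out: Set[str] = set()
--     for p in paths:
--         if not p: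
--             continue
--         for j, ch in enumerate(p):
--             if ch == '.':
--                 out.add(p[:j])
--         out.add(p)
--     return out
-- ===== Notes on version B (the rewrite author's own statement) =====
-- stated objective: simpler
-- what changed: B makes a single character pass over each path, adding the slice p[:j] at every dot position and finally p itself, instead of splitting the path into a chunk list and re-joining every forward prefix of it.
import Mathlib
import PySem

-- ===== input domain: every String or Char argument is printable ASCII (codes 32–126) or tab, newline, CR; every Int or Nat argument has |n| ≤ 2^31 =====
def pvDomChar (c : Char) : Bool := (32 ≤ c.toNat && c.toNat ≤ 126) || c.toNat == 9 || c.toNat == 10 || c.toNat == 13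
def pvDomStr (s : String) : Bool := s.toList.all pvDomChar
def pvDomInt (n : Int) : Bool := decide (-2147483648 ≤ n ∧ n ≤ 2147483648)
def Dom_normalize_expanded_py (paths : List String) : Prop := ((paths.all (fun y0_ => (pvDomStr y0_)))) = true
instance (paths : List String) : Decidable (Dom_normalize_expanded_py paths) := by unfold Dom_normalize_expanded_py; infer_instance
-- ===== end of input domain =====

-- B replaces A's split-into-chunks-and-join-each-prefix with a single character pass per
-- path adding the slice before each dot, then the path itself (objective: simpler; same set,
-- same insertion order). Equivalence is about the returned set; neither version mutates input.

-- ===== PORT A =====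
-- for p in paths: if not p: continue; chunks = p.split("."); for i in range(1, len(chunks)+1): out.add(".".join(chunks[:i]))
def normalize_expanded_py (paths : List String) : List String :=
  paths.foldl (fun out p =>
    if p = "" then out
    else
      let chunks : List (List Char) := PySem.Chars.splitOn p.toList ['.']
      (PySem.List.pyRange 1 ((chunks.length : Int) + 1)).foldl
        (fun out i =>
          PySem.Set.add out
            (String.ofList (PySem.Chars.join ['.'] (PySem.List.slice chunks none (some i)))))
        out) []

-- ===== PORT B =====
-- for p in paths: if not p: continue; for j, ch in enumerate(p): if ch == '.': out.add(p[:j]); out.add(p)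
def normalize_expanded_py_alt (paths : List String) : List String :=
  paths.foldl (fun out p =>
    if p = "" then out
    else
      let out := (PySem.List.enumerate p.toList).foldl
        (fun out jc =>
          if jc.2 = '.' then
            PySem.Set.add out (String.ofList (PySem.List.slice p.toList none (some jc.1)))
          else out) out
      PySem.Set.add out p) []

-- ===== PRECONDITION & SPEC =====
def Spec_normalize_expanded_py (paths : List String) (out : List String) : Prop := out = normalize_expanded_py_alt paths
instance (paths : List String) (out : List String) : Decidable (Spec_normalize_expanded_py paths out) := by unfold Spec_normalize_expanded_py; infer_instance

-- ===== CLAIM (what is proved, stated in full; the proofs are below) =====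
def Claim_equal_normalize_expanded_py : Prop := ∀ (paths : List String), Dom_normalize_expanded_py paths → Spec_normalize_expanded_py paths (normalize_expanded_py paths)

-- ===== LEMMAS AND PROOFS =====

-- simple recursive form of p.split(".")  (splitAux cs cur: cur = reversed current chunk)
def splitAux : List Char → List Char → List (List Char)
  | [], cur => [cur.reverse]
  | c :: rest, cur =>
      if c = '.' then cur.reverse :: splitAux rest [] else splitAux rest (c :: cur)

-- the strings B adds for one path (pre = reversed consumed prefix): prefix before each dot, then the whole path
def emitted : List Char → List Char → List (List Char)
  | [], pre => [pre.reverse]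
  | c :: rest, pre =>
      if c = '.' then pre.reverse :: emitted rest (c :: pre) else emitted rest (c :: pre)

-- the strings A adds for one path, as joined chunk prefixes
def prefixJoins (l : List (List Char)) : List (List Char) :=
  (List.range l.length).map (fun i => PySem.Chars.join ['.'] (l.take (i + 1)))

theorem splitAux_cur (cs : List Char) : ∀ cur,
    splitAux cs cur = (cur.reverse ++ (splitAux cs []).headI) :: (splitAux cs []).tail := by
  induction cs with
  | nil => intro cur; simp [splitAux]
  | cons c rest ih =>
    intro cur
    by_cases hc : c = '.'
    · simp [splitAux, hc]
    · simp only [splitAux, if_neg hc, ih (c :: cur), ih [c]]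
      simp [List.append_assoc]

theorem emitted_pre (cs : List Char) : ∀ pre,
    emitted cs pre = (emitted cs []).map (fun x => pre.reverse ++ x) := by
  induction cs with
  | nil => intro pre; simp [emitted]
  | cons c rest ih =>
    intro pre
    by_cases hc : c = '.'
    · simp only [emitted, if_pos hc, ih (c :: pre), ih [c], List.map_cons, List.map_map]
      simp [Function.comp_def, List.append_assoc]
    · simp only [emitted, if_neg hc, ih (c :: pre), ih [c], List.map_map]
      simp [Function.comp_def, List.append_assoc]

theorem prefixJoins_cons (x : List Char) (l : List (List Char)) :
    prefixJoins (x :: l) = x :: (prefixJoins l).map (fun s => x ++ '.' :: s) := by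
  unfold prefixJoins
  rw [List.length_cons, List.range_succ_eq_map, List.map_cons, List.map_map, List.map_map]
  refine congrArg₂ List.cons (by simp [PySem.Chars.join_singleton]) ?_
  refine List.map_congr_left ?_
  intro i hi
  have hi' : i < l.length := List.mem_range.mp hi
  obtain ⟨y, t, hyt⟩ : ∃ y t, l.take (i + 1) = y :: t := by
    cases h : l.take (i + 1) with
    | nil =>
      exfalso
      have hlen : (l.take (i + 1)).length = 0 := by rw [h]; rfl
      rw [List.length_take] at hlen
      omega
    | cons y t => exact ⟨y, t, rfl⟩
  simp only [Function.comp_apply, List.take_succ_cons, hyt, PySem.Chars.join_cons_cons]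
  simp

theorem prefixJoins_splitAux (cs : List Char) :
    prefixJoins (splitAux cs []) = emitted cs [] := by
  induction cs with
  | nil =>
    simp [splitAux, emitted, prefixJoins, PySem.Chars.join_singleton, List.range_succ]
  | cons c rest ih =>
    set hd := (splitAux rest []).headI with hhd
    set tl := (splitAux rest []).tail with htl
    have h1 : splitAux rest [] = hd :: tl := by simpa using splitAux_cur rest []
    by_cases hc : c = '.'
    · subst hc
      have hsplit : splitAux ('.' :: rest) [] = [] :: hd :: tl := by simp [splitAux, h1]
      have hrhs : emitted ('.' :: rest) [] = [] :: (emitted rest []).map (fun x => '.' :: x) := by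
        simp [emitted, emitted_pre rest ['.']]
      rw [hsplit, prefixJoins_cons, ← h1, ih, hrhs]
      simp
    · have hsplit : splitAux (c :: rest) [] = (c :: hd) :: tl := by
        simp [splitAux, hc, splitAux_cur rest [c], ← hhd, ← htl]
      have hrhs : emitted (c :: rest) [] = (emitted rest []).map (fun x => c :: x) := by
        simp [emitted, hc, emitted_pre rest [c]]
      rw [hsplit, prefixJoins_cons, hrhs, ← ih, h1, prefixJoins_cons]
      simp [List.map_map, Function.comp_def]

-- splitOn with a single-character separator is splitAux
theorem splitOn_go_dot (fuel : Nat) : ∀ (l cur : List Char) (acc : List (List Char)),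
    l.length < fuel →
    PySem.Chars.splitOn.go ['.'] fuel l cur acc = acc.reverse ++ splitAux l cur := by
  induction fuel with
  | zero => intro l cur acc h; omega
  | succ fuel ih =>
    intro l cur acc h
    cases l with
    | nil => simp [PySem.Chars.splitOn.go, splitAux]
    | cons c rest =>
      by_cases hc : c = '.'
      · have hpre : List.isPrefixOf ['.'] (c :: rest) = true := by
          simp [List.isPrefixOf, hc]
        rw [PySem.Chars.splitOn.go]
        simp only [hpre, if_pos]
        rw [ih _ _ _ (by simpa using Nat.lt_of_succ_lt_succ h)]
        simp [splitAux, hc]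
      · have hpre : List.isPrefixOf ['.'] (c :: rest) = false := by
          simp [List.isPrefixOf]
          exact fun h' => hc h'.symm
        rw [PySem.Chars.splitOn.go]
        simp only [hpre, Bool.false_eq_true, if_false, splitAux, if_neg hc]
        exact ih _ _ _ (by simp at h; omega)

theorem splitOn_dot (cs : List Char) : PySem.Chars.splitOn cs ['.'] = splitAux cs [] := by
  rw [PySem.Chars.splitOn, splitOn_go_dot _ _ _ _ (by omega)]
  simp

-- range(1, n+1) as a mapped List.range
theorem pyRange_one_succ (n : Nat) :
    PySem.List.pyRange 1 ((n : Int) + 1) = (List.range n).map (fun k => ((k + 1 : Nat) : Int)) := by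
  induction n with
  | zero =>
    show PySem.List.pyRange 1 (0 + 1) = _
    simp
  | succ m ih =>
    have h : ((m + 1 : Nat) : Int) + 1 = ((m : Int) + 1) + 1 := by push_cast; ring
    rw [h, PySem.List.pyRange_one_succ_right (by omega), ih, List.range_succ]
    simp

-- a conditional add-loop is an add-fold over the filtered, mapped list
theorem foldl_if_add {α : Type} (l : List α) (c : α → Bool) (f : α → String) :
    ∀ out : PySem.Set String,
    l.foldl (fun o x => if c x then PySem.Set.add o (f x) else o) out
      = ((l.filter c).map f).foldl PySem.Set.add out := by
  induction l with
  | nil => intro out; rfl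
  | cons x t ih =>
    intro out
    by_cases hx : c x = true
    · simp [hx, ih]
    · simp [hx, ih]

-- B's loop emits exactly `emitted`: prefix before each dot (as a slice), then the path
theorem emitted_enumerate (cs : List Char) : ∀ (rest pre : List Char),
    pre.reverse ++ rest = cs →
    emitted rest pre
      = ((PySem.List.enumerate rest (pre.length : Int)).filter (fun jc => jc.2 = '.')).map
          (fun jc => PySem.List.slice cs none (some jc.1)) ++ [cs] := by
  intro rest
  induction rest with
  | nil => intro pre h; simp [emitted, PySem.List.enumerate, ← h]
  | cons c rest' ih =>
    intro pre h
    have hrec := ih (c :: pre) (by simpa [List.append_assoc] using h)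
    have hlen : ((c :: pre).length : Int) = (pre.length : Int) + 1 := by simp
    have hslice : PySem.List.slice cs none (some ((pre.length : Nat) : Int)) = pre.reverse := by
      rw [PySem.List.slice_to_natCast, ← h]
      exact List.take_left' (by simp)
    by_cases hc : c = '.'
    · simp only [emitted, if_pos hc, hrec, hlen, PySem.List.enumerate, List.filter_cons]
      simp [hc, hslice]
    · simp only [emitted, if_neg hc, hrec, hlen, PySem.List.enumerate, List.filter_cons]
      simp [hc]

-- per-path step functions of the two ports agree
theorem step_eq (out : List String) (p : String) :
    (if p = "" then out
     else
       let chunks : List (List Char) := PySem.Chars.splitOn p.toList ['.']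
       (PySem.List.pyRange 1 ((chunks.length : Int) + 1)).foldl
         (fun out i =>
           PySem.Set.add out
             (String.ofList (PySem.Chars.join ['.'] (PySem.List.slice chunks none (some i)))))
         out)
    = (if p = "" then out
       else
         let out := (PySem.List.enumerate p.toList).foldl
           (fun out jc =>
             if jc.2 = '.' then
               PySem.Set.add out (String.ofList (PySem.List.slice p.toList none (some jc.1)))
             else out) out
         PySem.Set.add out p) := by
  by_cases hp : p = ""
  · simp [hp]
  · simp only [if_neg hp]
    set chunks : List (List Char) := PySem.Chars.splitOn p.toList ['.'] with hchunks
    -- A's side: fold of Set.add over the mapped range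
    have hA : (PySem.List.pyRange 1 ((chunks.length : Int) + 1)).foldl
        (fun out i =>
          PySem.Set.add out
            (String.ofList (PySem.Chars.join ['.'] (PySem.List.slice chunks none (some i)))))
        out
        = ((prefixJoins chunks).map String.ofList).foldl PySem.Set.add out := by
      rw [pyRange_one_succ, prefixJoins, List.map_map]
      simp only [List.foldl_map]
      refine PySem.List.foldl_congr_mem _ _ _ _ ?_
      intro o i hi
      rw [PySem.List.slice_to_natCast]
      rfl
    -- B's side: conditional fold then final add, as a fold over emitted strings
    have hB : PySem.Set.add
        ((PySem.List.enumerate p.toList).foldl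
          (fun out jc =>
            if jc.2 = '.' then
              PySem.Set.add out (String.ofList (PySem.List.slice p.toList none (some jc.1)))
            else out) out) p
        = ((emitted p.toList []).map String.ofList).foldl PySem.Set.add out := by
      have he := emitted_enumerate p.toList p.toList [] (by simp)
      have hfold : (PySem.List.enumerate p.toList).foldl
          (fun out jc =>
            if jc.2 = '.' then
              PySem.Set.add out (String.ofList (PySem.List.slice p.toList none (some jc.1)))
            else out) out
          = (((PySem.List.enumerate p.toList).filter (fun jc => jc.2 = '.')).map
              (fun jc => String.ofList (PySem.List.slice p.toList none (some jc.1)))).foldl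
              PySem.Set.add out := by
        have := foldl_if_add (PySem.List.enumerate p.toList)
          (fun jc => decide (jc.2 = '.'))
          (fun jc => String.ofList (PySem.List.slice p.toList none (some jc.1))) out
        simpa using this
      rw [hfold]
      have hmap : (emitted p.toList []).map String.ofList
          = ((PySem.List.enumerate p.toList).filter (fun jc => jc.2 = '.')).map
              (fun jc => String.ofList (PySem.List.slice p.toList none (some jc.1)))
            ++ [String.ofList p.toList] := by
        rw [he]
        simp [List.map_map, Function.comp_def]
      have hof : String.ofList p.toList = p := by simp
      rw [hmap, hof, List.foldl_append]
      rfl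
    rw [hA, hB, ← prefixJoins_splitAux, ← splitOn_dot]

-- ===== VERDICT (by name: the statement is the Claim_ definition above) =====
theorem normalize_expanded_py_spec : Claim_equal_normalize_expanded_py := by
  intro paths _
  show normalize_expanded_py paths = normalize_expanded_py_alt paths
  unfold normalize_expanded_py normalize_expanded_py_alt
  exact PySem.List.foldl_congr_mem _ _ _ _ (fun o p _ => step_eq o p)
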